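-- pv_equiv track=rewrite | github.com/lizsteny/TemporalSharedCode | rosalind/P4 TMHMM.py | count_transmembrane_segments
-- ===== SOURCE A (Python) =====
-- def count_transmembrane_segments(symbol_class):
--     """
--     Calculate proteins classified as transmembrane for a segment
--
--     :param symbol_class: str, protein symbol class
--     :return: int, number of proteins classified as transmembrane
--     """
--     symbol_class = symbol_class.replace('O', 'I')
--     segments = symbol_class.split('I')
--     transmembrane_count = 0
--     for seg in segments:
--         if 'M' in seg:
--             transmembrane_count += 1
--     return transmembrane_count
-- ===== SOURCE B (Python) =====
-- def count_transmembrane_segments(symbol_class):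
--     """Single-pass state machine: count maximal I/O-free runs containing 'M'."""
--     count = 0
--     in_segment = False
--     for ch in symbol_class:
--         if ch == 'I' or ch == 'O':
--             in_segment = False
--         elif ch == 'M' and not in_segment:
--             count += 1
--             in_segment = True
--     return count
-- ===== Notes on version B (the rewrite author's own statement) =====
-- stated objective: simpler
-- what changed: Replaced the replace-then-split-then-scan pipeline (three passes building intermediate strings/lists) by a single pass over the characters with a boolean state flag and a counter.
import Mathlib
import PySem

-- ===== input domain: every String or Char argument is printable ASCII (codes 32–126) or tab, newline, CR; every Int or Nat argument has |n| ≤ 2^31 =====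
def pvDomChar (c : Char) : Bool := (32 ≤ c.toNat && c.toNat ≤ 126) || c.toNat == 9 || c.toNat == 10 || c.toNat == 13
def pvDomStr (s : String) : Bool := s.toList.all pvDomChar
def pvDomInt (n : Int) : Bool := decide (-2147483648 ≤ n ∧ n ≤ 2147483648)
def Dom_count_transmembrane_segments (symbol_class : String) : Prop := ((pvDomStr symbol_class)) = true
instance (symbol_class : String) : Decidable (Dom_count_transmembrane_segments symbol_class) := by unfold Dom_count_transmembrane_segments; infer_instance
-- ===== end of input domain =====

-- B replaces A's replace→split→scan pipeline by a single-pass state machine (simpler, no intermediate strings).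


-- ===== PORT A =====
-- symbol_class.replace('O','I'); split('I'); count segments containing 'M'
def count_transmembrane_segments (symbol_class : String) : Int :=
  let s := PySem.Str.replace symbol_class "O" "I"
  let segments := (PySem.Str.split? s "I").getD []   -- sep "I" ≠ "", so split? is always some
  segments.foldl (fun acc seg => if PySem.Str.isIn "M" seg then acc + 1 else acc) 0

-- ===== PORT B =====
-- single pass: reset on 'I'/'O', count the first 'M' of each run
def count_transmembrane_segments_alt (symbol_class : String) : Int :=
  (symbol_class.toList.foldl
    (fun (st : Int × Bool) c =>
      if c = 'I' ∨ c = 'O' then (st.1, false)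
      else if c = 'M' ∧ st.2 = false then (st.1 + 1, true)
      else st) (0, false)).1

-- ===== PRECONDITION & SPEC =====
def Spec_count_transmembrane_segments (symbol_class : String) (out : Int) : Prop := out = count_transmembrane_segments_alt symbol_class
instance (symbol_class : String) (out : Int) : Decidable (Spec_count_transmembrane_segments symbol_class out) := by unfold Spec_count_transmembrane_segments; infer_instance

-- ===== CLAIM (what is proved, stated in full; the proofs are below) =====
def Claim_equal_count_transmembrane_segments : Prop := ∀ (symbol_class : String), Dom_count_transmembrane_segments symbol_class → Spec_count_transmembrane_segments symbol_class (count_transmembrane_segments symbol_class)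

-- ===== LEMMAS AND PROOFS =====

/-- normalization performed by A's `.replace('O','I')` -/
def pvNorm (c : Char) : Char := if c = 'O' then 'I' else c

/-- specification of splitting on 'I' -/
def pvSpl : List Char → List (List Char)
  | [] => [[]]
  | c :: t => if c = 'I' then [] :: pvSpl t else (pvSpl t).modifyHead (c :: ·)

/-- indicator: segment contains 'M' -/
def pvInd (cs : List Char) : Int := if 'M' ∈ cs then 1 else 0

theorem pvSpl_ne_nil (l : List Char) : pvSpl l ≠ [] := by
  cases l with
  | nil => simp [pvSpl]
  | cons c t =>
      simp only [pvSpl]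
      split_ifs
      · simp
      · cases h : pvSpl t with
        | nil => exact absurd h (pvSpl_ne_nil t)
        | cons a r => simp

theorem replace_go_eq (l : List Char) : ∀ (fuel : Nat) (acc : List Char),
    l.length ≤ fuel →
    PySem.Chars.replace.go ['O'] ['I'] fuel l acc = acc.reverse ++ l.map pvNorm := by
  induction l with
  | nil =>
      intro fuel acc _
      cases fuel <;> simp [PySem.Chars.replace.go]
  | cons c t ih =>
      intro fuel acc h
      cases fuel with
      | zero => simp at h
      | succ f =>
        by_cases hc : c = 'O'
        · subst hc
          simp only [PySem.Chars.replace.go]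
          rw [if_pos (show List.isPrefixOf ['O'] ('O' :: t) = true from rfl)]
          rw [show List.drop (['O'].length) ('O' :: t) = t from rfl,
              show (['I'].reverse ++ acc : List Char) = 'I' :: acc from rfl]
          rw [ih f ('I' :: acc) (by simpa using h)]
          simp [pvNorm]
        · have hpre : List.isPrefixOf ['O'] (c :: t) = false := by
            simp [List.isPrefixOf]
            intro h'; exact hc h'.symm
          simp only [PySem.Chars.replace.go]
          rw [if_neg (by simp [hpre])]
          rw [ih f (c :: acc) (by simpa using h)]
          simp [pvNorm, hc]

theorem replace_eq (s : String) :
    (PySem.Str.replace s "O" "I").toList = s.toList.map pvNorm := by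
  rw [PySem.Str.toList_replace]
  show PySem.Chars.replace s.toList ['O'] ['I'] = _
  simp only [PySem.Chars.replace]
  rw [if_neg (by decide)]
  exact replace_go_eq s.toList s.toList.length [] (le_refl _)

theorem splitOn_go_eq (l : List Char) : ∀ (fuel : Nat) (cur : List Char) (acc : List (List Char)),
    l.length < fuel →
    PySem.Chars.splitOn.go ['I'] fuel l cur acc
      = acc.reverse ++ (pvSpl l).modifyHead (cur.reverse ++ ·) := by
  induction l with
  | nil =>
      intro fuel cur acc h
      cases fuel with
      | zero => simp at h
      | succ f => simp [PySem.Chars.splitOn.go, pvSpl]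
  | cons c t ih =>
      intro fuel cur acc h
      cases fuel with
      | zero => simp at h
      | succ f =>
        by_cases hc : c = 'I'
        · subst hc
          simp only [PySem.Chars.splitOn.go]
          rw [if_pos (show List.isPrefixOf ['I'] ('I' :: t) = true from rfl)]
          simp only [List.length_cons] at h
          rw [show List.drop (['I'].length) ('I' :: t) = t from rfl]
          rw [ih f [] (cur.reverse :: acc) (by omega)]
          cases hs : pvSpl t with
          | nil => exact absurd hs (pvSpl_ne_nil t)
          | cons a r => simp [pvSpl, hs]
        · have hpre : List.isPrefixOf ['I'] (c :: t) = false := by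
            simp [List.isPrefixOf]
            intro h'; exact hc h'.symm
          simp only [PySem.Chars.splitOn.go]
          rw [if_neg (by simp [hpre])]
          simp only [List.length_cons] at h
          rw [ih f (c :: cur) acc (by omega)]
          cases hs : pvSpl t with
          | nil => exact absurd hs (pvSpl_ne_nil t)
          | cons a r => simp [pvSpl, hs, hc]

theorem splitOn_eq (l : List Char) : PySem.Chars.splitOn l ['I'] = pvSpl l := by
  simp only [PySem.Chars.splitOn]
  rw [splitOn_go_eq l (l.length + 1) [] [] (by omega)]
  cases hs : pvSpl l with
  | nil => exact absurd hs (pvSpl_ne_nil l)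
  | cons a r => simp

theorem split?_eq (s : String) :
    ∃ segs : List String, PySem.Str.split? s "I" = some segs
      ∧ segs.map String.toList = pvSpl s.toList := by
  have h := PySem.Str.split?_map s "I"
  have hc : PySem.Chars.split? s.toList ("I" : String).toList = some (pvSpl s.toList) := by
    simp only [PySem.Chars.split?]
    rw [if_neg (by decide)]
    rw [show ("I" : String).toList = ['I'] from rfl, splitOn_eq]
  rw [hc] at h
  cases hsp : PySem.Str.split? s "I" with
  | none => rw [hsp] at h; simp at h
  | some segs =>
      rw [hsp] at h
      simp only [Option.map_some] at h
      exact ⟨segs, rfl, by injection h⟩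

theorem isIn_M (cs : List Char) :
    PySem.Chars.isIn ['M'] cs = decide ('M' ∈ cs) := by
  by_cases h : 'M' ∈ cs
  · simp only [h, decide_true]
    rw [PySem.Chars.isIn_iff_infix]
    obtain ⟨a, b, rfl⟩ := List.append_of_mem h
    exact ⟨a, b, by simp⟩
  · simp only [h, decide_false]
    rw [← Bool.not_eq_true, PySem.Chars.isIn_iff_infix]
    intro hin
    exact h (hin.mem (by simp))
  -- note: [x] <:+: l ↔ x ∈ l

theorem foldl_count_eq_sum (ss : List (List Char)) : ∀ (k : Int),
    ss.foldl (fun acc cs => if PySem.Chars.isIn ['M'] cs = true then acc + 1 else acc) k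
      = k + (ss.map pvInd).sum := by
  induction ss with
  | nil => intro k; simp
  | cons h t ih =>
      intro k
      simp only [List.foldl_cons, List.map_cons, List.sum_cons, ih]
      rw [isIn_M]
      by_cases hm : 'M' ∈ h <;> simp [pvInd, hm] <;> ring

/-- the single step of B's state machine, after normalization ('I' only) -/
def pvStepI (st : Int × Bool) (c : Char) : Int × Bool :=
  if c = 'I' then (st.1, false)
  else if c = 'M' ∧ st.2 = false then (st.1 + 1, true)
  else st

theorem machine_eq (l : List Char) : ∀ (k : Int) (b : Bool) (h : List Char) (r : List (List Char)),
    pvSpl l = h :: r →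
    (l.foldl pvStepI (k, b)).1
      = k + (if b = false ∧ 'M' ∈ h then 1 else 0) + (r.map pvInd).sum := by
  induction l with
  | nil =>
      intro k b h r hs
      simp only [pvSpl] at hs
      injection hs with h1 h2
      subst h1; subst h2
      simp
  | cons c t ih =>
      intro k b h r hs
      cases ht : pvSpl t with
      | nil => exact absurd ht (pvSpl_ne_nil t)
      | cons h' r' =>
        by_cases hc : c = 'I'
        · subst hc
          simp only [pvSpl, if_pos, ht] at hs
          injection hs with h1 h2
          subst h1; subst h2
          simp only [List.foldl_cons]
          rw [show pvStepI (k, b) 'I' = (k, false) from rfl]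
          rw [ih k false h' r' ht]
          simp [pvInd]
          by_cases hm : 'M' ∈ h' <;> simp [hm] <;> ring
        · simp only [pvSpl, hc, if_false, ht, List.modifyHead_cons] at hs
          injection hs with h1 h2
          subst h1; subst h2
          simp only [List.foldl_cons]
          by_cases hm : c = 'M' ∧ b = false
          · obtain ⟨hm1, hm2⟩ := hm
            subst hm1; subst hm2
            rw [show pvStepI (k, false) 'M' = (k + 1, true) from rfl]
            rw [ih (k + 1) true h' r' ht]
            simp
          · have hst : pvStepI (k, b) c = (k, b) := by
              simp only [pvStepI, hc, if_false]
              rw [if_neg hm]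
            rw [hst, ih k b h' r' ht]
            rcases Decidable.not_and_iff_not_or_not.mp hm with hm' | hb
            · have : ('M' ∈ c :: h') ↔ ('M' ∈ h') := by
                simp [List.mem_cons]
                intro he; exact absurd he.symm hm'
              simp [this]
            · simp at hb
              simp [hb]

theorem stepB_eq (st : Int × Bool) (c : Char) :
    (if c = 'I' ∨ c = 'O' then (st.1, false)
     else if c = 'M' ∧ st.2 = false then (st.1 + 1, true)
     else st) = pvStepI st (pvNorm c) := by
  by_cases ho : c = 'O'
  · subst ho; simp [pvNorm, pvStepI]
  · by_cases hi : c = 'I'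
    · subst hi; simp [pvNorm, pvStepI]
    · simp [pvNorm, pvStepI, ho, hi]

theorem alt_eq_machine (s : String) :
    count_transmembrane_segments_alt s = ((s.toList.map pvNorm).foldl pvStepI (0, false)).1 := by
  simp only [count_transmembrane_segments_alt, List.foldl_map]
  have hf : (fun (st : Int × Bool) c =>
      if c = 'I' ∨ c = 'O' then (st.1, false)
      else if c = 'M' ∧ st.2 = false then (st.1 + 1, true)
      else st) = fun st c => pvStepI st (pvNorm c) := by
    funext st c; exact stepB_eq st c
  rw [hf]

-- ===== VERDICT (by name: the statement is the Claim_ definition above) =====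
theorem count_transmembrane_segments_spec : Claim_equal_count_transmembrane_segments := by
  intro s _
  unfold Spec_count_transmembrane_segments
  simp only [count_transmembrane_segments]
  obtain ⟨segs, hsp, hmap⟩ := split?_eq (PySem.Str.replace s "O" "I")
  rw [hsp]
  simp only [Option.getD_some]
  rw [alt_eq_machine]
  rw [replace_eq] at hmap
  cases hs : pvSpl (s.toList.map pvNorm) with
  | nil => exact absurd hs (pvSpl_ne_nil _)
  | cons h r =>
    rw [machine_eq (s.toList.map pvNorm) 0 false h r hs]
    rw [hs] at hmap
    have : segs.foldl (fun acc seg => if PySem.Str.isIn "M" seg = true then acc + 1 else acc) (0 : Int)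
        = (segs.map String.toList).foldl
            (fun acc cs => if PySem.Chars.isIn ['M'] cs = true then acc + 1 else acc) (0 : Int) := by
      rw [List.foldl_map]
      have hf : (fun (acc : Int) (seg : String) => if PySem.Str.isIn "M" seg = true then acc + 1 else acc)
          = fun acc seg => if PySem.Chars.isIn ['M'] seg.toList = true then acc + 1 else acc := by
        funext acc seg
        rw [PySem.Str.isIn_eq]
        rfl
      exact congrFun (congrFun (congrArg List.foldl hf) 0) segs
    refine this.trans ?_
    rw [hmap, foldl_count_eq_sum]
    simp [pvInd]
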